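-- pv_equiv track=rewrite | github.com/School-courses/covid19-forecast | utils/helpers.py | create_relation_table
-- ===== SOURCE A (Python) =====
-- def create_relation_table(stream, stream_day, no_hist_vals):
--     """ Transform stream to relational/attricutional form
--
--     Args:
--         stream (list): list of consequtive number of stream
--         stream_day (list) day of the week
--         no_hist_vals (int): number of historical values to include in predictions
--     """
--     X = []
--     y = []
--     y_day = []
--     X_temp = []
--     for val, day in zip(stream, stream_day):
--         X_temp.append(val)
--         if len(X_temp) == no_hist_vals:
--             if len(X) != 0:
--                 y.append(val)
--                 y_day.append(day)
--
--             X.append(X_temp.copy())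
--             X_temp.pop(0)
--     X.pop(-1)
--
--     return X, y, y_day
-- ===== SOURCE B (Python) =====
-- def create_relation_table(stream, stream_day, no_hist_vals):
--     n = min(len(stream), len(stream_day))
--     X = [list(stream[i:i + no_hist_vals]) for i in range(n - no_hist_vals + 1)]
--     X.pop(-1)
--     y = list(stream[no_hist_vals:n])
--     y_day = list(stream_day[no_hist_vals:n])
--     return X, y, y_day
-- ===== Notes on version B (the rewrite author's own statement) =====
-- stated objective: simpler
-- what changed: Replaces A's running X_temp buffer with append/pop(0) and the X-nonempty flag by direct random-access slicing: windows stream[i:i+k] over an index range, targets stream[k:n] and stream_day[k:n] by slice, with n = min(len(stream), len(stream_day)).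
import Mathlib
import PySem

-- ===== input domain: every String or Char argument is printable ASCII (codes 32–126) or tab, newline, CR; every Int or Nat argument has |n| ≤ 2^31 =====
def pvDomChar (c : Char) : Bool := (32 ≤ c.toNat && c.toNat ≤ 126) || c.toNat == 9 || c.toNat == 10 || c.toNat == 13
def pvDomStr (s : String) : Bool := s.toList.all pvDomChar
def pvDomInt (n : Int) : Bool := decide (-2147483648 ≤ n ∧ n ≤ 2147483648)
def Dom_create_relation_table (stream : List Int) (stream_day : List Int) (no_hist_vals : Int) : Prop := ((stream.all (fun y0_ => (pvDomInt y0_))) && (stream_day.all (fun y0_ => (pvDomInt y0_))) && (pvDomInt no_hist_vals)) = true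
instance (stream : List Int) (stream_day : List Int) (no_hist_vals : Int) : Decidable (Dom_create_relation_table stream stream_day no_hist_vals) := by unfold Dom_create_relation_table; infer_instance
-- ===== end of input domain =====

-- B replaces A's running X_temp buffer (append / pop(0)) by direct slicing over an index
-- range (objective: simpler); equivalence is about the return value on Pre_ (A raises
-- IndexError at X.pop(-1) outside it, and B also manipulates fresh lists only).

-- ===== PORT A =====
-- loop body of A's 'for val, day in zip(...)' loop, state (X, y, y_day, X_temp)
def crtStep (no_hist_vals : Int) (acc : List (List Int) × List Int × List Int × List Int)
    (vd : Int × Int) : List (List Int) × List Int × List Int × List Int :=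
  let X := acc.1
  let y := acc.2.1
  let y_day := acc.2.2.1
  let X_temp := acc.2.2.2 ++ [vd.1]            -- X_temp.append(val)
  if (X_temp.length : Int) = no_hist_vals then
    let y := if X.length ≠ 0 then y ++ [vd.1] else y
    let y_day := if X.length ≠ 0 then y_day ++ [vd.2] else y_day
    (X ++ [X_temp], y, y_day, X_temp.tail)     -- X.append(X_temp.copy()); X_temp.pop(0)
  else
    (X, y, y_day, X_temp)

def create_relation_table (stream : List Int) (stream_day : List Int) (no_hist_vals : Int) :
    List (List Int) × List Int × List Int :=
  let st := (List.zip stream stream_day).foldl (crtStep no_hist_vals) ([], [], [], [])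
  -- X.pop(-1) raises IndexError on empty X (excluded by Pre_); the kept list is dropLast
  (st.1.dropLast, st.2.1, st.2.2.1)

-- ===== PORT B =====
def create_relation_table_alt (stream : List Int) (stream_day : List Int) (no_hist_vals : Int) :
    List (List Int) × List Int × List Int :=
  let n : Int := min (stream.length : Int) (stream_day.length : Int)
  let X := (PySem.List.pyRange 0 (n - no_hist_vals + 1) 1).map
      (fun i => PySem.List.slice stream (some i) (some (i + no_hist_vals)))
  -- X.pop(-1) raises IndexError on empty X (excluded by Pre_); the kept list is dropLast
  (X.dropLast,
    PySem.List.slice stream (some no_hist_vals) (some n),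
    PySem.List.slice stream_day (some no_hist_vals) (some n))

-- ===== PRECONDITION & SPEC =====
-- Pre_ excludes exactly the inputs on which A raises IndexError at X.pop(-1):
-- no window of length no_hist_vals is ever completed unless 1 ≤ no_hist_vals ≤ min of the lengths.
def Pre_create_relation_table (stream : List Int) (stream_day : List Int) (no_hist_vals : Int) : Prop :=
  1 ≤ no_hist_vals ∧ no_hist_vals ≤ min (stream.length : Int) (stream_day.length : Int)
instance (stream : List Int) (stream_day : List Int) (no_hist_vals : Int) : Decidable (Pre_create_relation_table stream stream_day no_hist_vals) := by unfold Pre_create_relation_table; infer_instance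

def pvWitness_create_relation_table : List Int × List Int × Int := ([1, 2, 3, 4], [0, 1, 2, 3], 2)

def Spec_create_relation_table (stream : List Int) (stream_day : List Int) (no_hist_vals : Int) (out : List (List Int) × List Int × List Int) : Prop := out = create_relation_table_alt stream stream_day no_hist_vals
instance (stream : List Int) (stream_day : List Int) (no_hist_vals : Int) (out : List (List Int) × List Int × List Int) : Decidable (Spec_create_relation_table stream stream_day no_hist_vals out) := by unfold Spec_create_relation_table; infer_instance

-- ===== CLAIM (what is proved, stated in full; the proofs are below) =====
def Claim_equal_create_relation_table : Prop := ∀ (stream : List Int) (stream_day : List Int) (no_hist_vals : Int), Dom_create_relation_table stream stream_day no_hist_vals → Pre_create_relation_table stream stream_day no_hist_vals → Spec_create_relation_table stream stream_day no_hist_vals (create_relation_table stream stream_day no_hist_vals)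

-- ===== LEMMAS AND PROOFS =====

-- pure recursive description of what A's loop appends once the buffer is Xt
def crtRun (K : Nat) (Xt : List Int) : List (Int × Int) → List (List Int) × List Int × List Int
  | [] => ([], [], [])
  | (v, d) :: rest =>
    if (Xt ++ [v]).length = K then
      let r := crtRun K (Xt ++ [v]).tail rest
      ((Xt ++ [v]) :: r.1, v :: r.2.1, d :: r.2.2)
    else
      crtRun K (Xt ++ [v]) rest

theorem foldl_crtStep_ne_nil (k : Int) (K : Nat) (hK : (K : Int) = k) :
    ∀ (zs : List (Int × Int)) (X : List (List Int)) (y yd Xt : List Int), X ≠ [] →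
    ∃ T, List.foldl (crtStep k) (X, y, yd, Xt) zs =
      (X ++ (crtRun K Xt zs).1, y ++ (crtRun K Xt zs).2.1, yd ++ (crtRun K Xt zs).2.2, T) := by
  intro zs
  induction zs with
  | nil => intro X y yd Xt hX; exact ⟨Xt, by simp [crtRun]⟩
  | cons vd rest ih =>
    intro X y yd Xt hX
    obtain ⟨v, d⟩ := vd
    have hlen : X.length ≠ 0 := by simpa [List.length_eq_zero_iff] using hX
    by_cases h : (Xt ++ [v]).length = K
    · have hInt : ((Xt ++ [v]).length : Int) = k := by rw [h, hK]
      obtain ⟨T, hT⟩ := ih (X ++ [Xt ++ [v]]) (y ++ [v]) (yd ++ [d]) (Xt ++ [v]).tail (by simp)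
      refine ⟨T, ?_⟩
      simp only [List.foldl_cons, crtStep, hInt, hlen, ne_eq, not_false_iff, if_true,
        crtRun, if_pos h, hT]
      simp
    · have hInt : ¬ ((Xt ++ [v]).length : Int) = k := by
        intro hc; apply h; omega
      obtain ⟨T, hT⟩ := ih X y yd (Xt ++ [v]) hX
      refine ⟨T, ?_⟩
      simp only [List.foldl_cons, crtStep, if_neg hInt, crtRun, if_neg h, hT]

theorem foldl_crtStep_nil (k : Int) (K : Nat) (hK : (K : Int) = k) :
    ∀ (zs : List (Int × Int)) (y yd Xt : List Int),
    ∃ T, List.foldl (crtStep k) ([], y, yd, Xt) zs =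
      ((crtRun K Xt zs).1, y ++ (crtRun K Xt zs).2.1.drop 1, yd ++ (crtRun K Xt zs).2.2.drop 1, T) := by
  intro zs
  induction zs with
  | nil => intro y yd Xt; exact ⟨Xt, by simp [crtRun]⟩
  | cons vd rest ih =>
    intro y yd Xt
    obtain ⟨v, d⟩ := vd
    by_cases h : (Xt ++ [v]).length = K
    · have hInt : ((Xt ++ [v]).length : Int) = k := by rw [h, hK]
      obtain ⟨T, hT⟩ := foldl_crtStep_ne_nil k K hK rest [Xt ++ [v]] y yd (Xt ++ [v]).tail (by simp)
      refine ⟨T, ?_⟩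
      simp only [List.foldl_cons, crtStep, hInt, crtRun, if_pos h]
      simpa using hT
    · have hInt : ¬ ((Xt ++ [v]).length : Int) = k := by
        intro hc; apply h; omega
      obtain ⟨T, hT⟩ := ih y yd (Xt ++ [v])
      refine ⟨T, ?_⟩
      simp only [List.foldl_cons, crtStep, if_neg hInt, crtRun, if_neg h, hT]

theorem crtRun_eq (K : Nat) :
    ∀ (zs : List (Int × Int)) (Xt : List Int), Xt.length < K →
    crtRun K Xt zs =
      ((List.range (Xt.length + zs.length + 1 - K)).map
          (fun i => ((Xt ++ zs.map Prod.fst).drop i).take K),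
        (zs.map Prod.fst).drop (K - 1 - Xt.length),
        (zs.map Prod.snd).drop (K - 1 - Xt.length)) := by
  intro zs
  induction zs with
  | nil =>
    intro Xt hXt
    have h0 : Xt.length + 0 + 1 - K = 0 := by omega
    simp [crtRun, h0]
  | cons vd rest ih =>
    intro Xt hXt
    obtain ⟨v, d⟩ := vd
    by_cases h : (Xt ++ [v]).length = K
    · have hm : Xt.length + 1 = K := by simpa using h
      have htail : (Xt ++ [v]).tail.length < K := by
        simp [List.length_tail]; omega
      have hr := ih (Xt ++ [v]).tail htail
      have hrange : Xt.length + (rest.length + 1) + 1 - K = rest.length + 1 := by omega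
      have htlen : (Xt ++ [v]).tail.length + rest.length + 1 - K = rest.length := by
        simp [List.length_tail]; omega
      have hd0 : K - 1 - Xt.length = 0 := by omega
      have hd0' : K - 1 - (Xt ++ [v]).tail.length = 0 := by
        simp [List.length_tail]; omega
      simp only [crtRun, if_pos h, hr, htlen, hd0, hd0', List.length_cons, hrange,
        List.map_cons, List.drop_zero, Prod.mk.injEq]
      refine ⟨?_, trivial⟩
      rw [List.range_succ_eq_map, List.map_cons, List.map_map]
      have e0 : ((Xt ++ v :: List.map Prod.fst rest).drop 0).take K = Xt ++ [v] := by
        rw [List.drop_zero, show Xt ++ v :: List.map Prod.fst rest = (Xt ++ [v]) ++ List.map Prod.fst rest by simp]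
        exact List.take_left' h
      obtain ⟨a, L, hL⟩ := List.exists_cons_of_ne_nil (by simp : Xt ++ [v] ≠ [])
      have es : ∀ i ∈ List.range rest.length,
          ((fun i => ((Xt ++ v :: List.map Prod.fst rest).drop i).take K) ∘ Nat.succ) i
            = (fun i => (((Xt ++ [v]).tail ++ List.map Prod.fst rest).drop i).take K) i := by
        intro i _
        have hsplit : Xt ++ v :: List.map Prod.fst rest = a :: (L ++ List.map Prod.fst rest) := by
          rw [show Xt ++ v :: List.map Prod.fst rest = (Xt ++ [v]) ++ List.map Prod.fst rest by simp, hL]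
          simp
        simp [hsplit, hL, Function.comp]
      rw [e0, List.map_congr_left es]
    · have hm : Xt.length + 1 < K := by
        have : (Xt ++ [v]).length = Xt.length + 1 := by simp
        omega
      have hr := ih (Xt ++ [v]) (by simpa using hm)
      have hrange : (Xt ++ [v]).length + rest.length + 1 - K = Xt.length + (rest.length + 1) + 1 - K := by
        simp; omega
      have hdrop : K - 1 - (Xt ++ [v]).length = K - 2 - Xt.length := by simp; omega
      have hdropc : ∀ (l : List Int), (v :: l).drop (K - 1 - Xt.length) = l.drop (K - 2 - Xt.length) := by
        intro l
        have : K - 1 - Xt.length = (K - 2 - Xt.length) + 1 := by omega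
        simp [this]
      have hcast : ∀ (l : List Int), (d :: l).drop (K - 1 - Xt.length) = l.drop (K - 2 - Xt.length) := by
        intro l
        have : K - 1 - Xt.length = (K - 2 - Xt.length) + 1 := by omega
        simp [this]
      simp only [crtRun, if_neg h, hr, hrange, hdrop, List.map_cons, List.length_cons,
        Prod.mk.injEq]
      refine ⟨?_, (hdropc _).symm, (hcast _).symm⟩
      apply List.map_congr_left
      intro i _
      rw [show Xt ++ v :: List.map Prod.fst rest = (Xt ++ [v]) ++ List.map Prod.fst rest by simp]

theorem map_fst_zip_take {α β : Type} : ∀ (a : List α) (b : List β),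
    (List.zip a b).map Prod.fst = a.take b.length := by
  intro a
  induction a with
  | nil => intro b; simp
  | cons x xs ih =>
    intro b
    cases b with
    | nil => simp
    | cons y ys => simp [ih ys]

theorem map_snd_zip_take {α β : Type} : ∀ (a : List α) (b : List β),
    (List.zip a b).map Prod.snd = b.take a.length := by
  intro a
  induction a with
  | nil => intro b; simp
  | cons x xs ih =>
    intro b
    cases b with
    | nil => simp
    | cons y ys => simp [ih ys]

-- ===== VERDICT (by name: the statement is the Claim_ definition above) =====
theorem create_relation_table_spec : Claim_equal_create_relation_table := by
  intro stream stream_day k _hDom hPre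
  obtain ⟨h1, h2⟩ := hPre
  unfold Spec_create_relation_table
  set K : Nat := k.toNat with hKdef
  have hK : (K : Int) = k := Int.toNat_of_nonneg (by omega)
  set n : Nat := min stream.length stream_day.length with hn
  have hKn : K ≤ n := by omega
  have hK1 : 1 ≤ K := by omega
  -- A side
  unfold create_relation_table
  obtain ⟨T, hT⟩ := foldl_crtStep_nil k K hK (List.zip stream stream_day) [] [] []
  rw [hT]
  have hzlen : (List.zip stream stream_day).length = n := by simp [hn]
  have hrun := crtRun_eq K (List.zip stream stream_day) [] (by simpa using hK1)
  rw [hrun]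
  simp only [List.length_nil, List.nil_append, Nat.zero_add, Nat.sub_zero, hzlen,
    map_fst_zip_take, map_snd_zip_take]
  -- B side
  simp only [create_relation_table_alt]
  have hmin : min (stream.length : Int) (stream_day.length : Int) = (n : Int) := by
    rw [hn]; push_cast; rfl
  have hb : (n : Int) - k + 1 = ((n + 1 - K : Nat) : Int) := by omega
  rw [hmin, hb, PySem.List.pyRange_one, List.map_map]
  have hXB : ∀ i ∈ List.range ((((n + 1 - K : Nat) : Int)) - 0).toNat,
      ((fun i => PySem.List.slice stream (some i) (some (i + k))) ∘ fun j => (0 : Int) + (j : Nat)) i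
        = (stream.drop i).take K := by
    intro i _
    simp only [Function.comp, Int.zero_add]
    rw [← hK, PySem.List.slice_natCast_add]
  rw [List.map_congr_left hXB]
  have hto : (((n + 1 - K : Nat) : Int) - 0).toNat = n + 1 - K := by omega
  rw [hto]
  -- now compare the three components
  refine Prod.ext ?_ (Prod.ext ?_ ?_)
  · -- X
    simp only
    congr 1
    apply List.map_congr_left
    intro i hi
    have hi' : i < n + 1 - K := List.mem_range.mp hi
    rw [List.drop_take, List.take_take]
    congr 1
    omega
  · -- y
    simp only [List.nil_append]
    have hdd : ((stream.take stream_day.length).drop (K - 1)).drop 1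
        = (stream.take stream_day.length).drop K := by
      rw [List.drop_drop]; congr 1; omega
    rw [hdd, List.drop_take, PySem.List.slice_toNat stream (by omega) (by omega)]
    rw [show k.toNat = K from rfl, show (n : Int).toNat = n by omega]
    rw [List.take_eq_take_iff]
    simp [hn]; omega
  · -- y_day
    simp only [List.nil_append]
    have hdd : ((stream_day.take stream.length).drop (K - 1)).drop 1
        = (stream_day.take stream.length).drop K := by
      rw [List.drop_drop]; congr 1; omega
    rw [hdd, List.drop_take, PySem.List.slice_toNat stream_day (by omega) (by omega)]
    rw [show k.toNat = K from rfl, show (n : Int).toNat = n by omega]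
    rw [List.take_eq_take_iff]
    simp [hn]; omega
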